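-- pv_equiv track=rewrite | github.com/Cinnabon163/Ege | codewars/horse.py | horse
-- ===== SOURCE A (Python) =====
-- def horse(N:int, M:int):
--     board = [[0]*M for _ in range(N)]
--     board[0][0] = 1
--     # [N-1][M-1]
--
--     for i in range(N):
--         for j in range(M):
--             if board[i][j] != 0:
--                 if i+2 < N and j+1 < M:
--                     board[i+2][j+1] += board[i][j]
--                 if i+1 < N and j+2 < M:
--                     board[i+1][j+2] += board[i][j]
--     return board, board[N-1][M-1]
-- ===== SOURCE B (Python) =====
-- def horse(N: int, M: int):
--     # Closed form: a path to (i, j) uses a moves of (2,1) and b moves of (1,2)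
--     # with 2a+b = i and a+2b = j, so a = (2i-j)/3, b = (2j-i)/3; the number of
--     # paths is the binomial coefficient C(a+b, a) (0 if a or b is not a
--     # nonnegative integer).  Each cell is computed independently; no DP table.
--     def paths(i, j):
--         if (i + j) % 3:
--             return 0
--         a = (2 * i - j) // 3
--         b = (2 * j - i) // 3
--         if a < 0 or b < 0:
--             return 0
--         r = 1
--         for k in range(1, a + 1):
--             r = r * (b + k) // k
--         return r
--     board = [[paths(i, j) for j in range(M)] for i in range(N)]
--     return board, board[N - 1][M - 1]
-- ===== Notes on version B (the rewrite author's own statement) =====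
-- stated objective: alternative
-- what changed: A's push/scatter DP over the board is replaced by a combinatorial closed form: each cell (i,j) is computed independently as the binomial coefficient C(a+b,a) with a=(2i-j)/3, b=(2j-i)/3 (0 when these are not nonnegative integers), evaluated by a short multiplicative product; no DP table dependence between cells.
import Mathlib
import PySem

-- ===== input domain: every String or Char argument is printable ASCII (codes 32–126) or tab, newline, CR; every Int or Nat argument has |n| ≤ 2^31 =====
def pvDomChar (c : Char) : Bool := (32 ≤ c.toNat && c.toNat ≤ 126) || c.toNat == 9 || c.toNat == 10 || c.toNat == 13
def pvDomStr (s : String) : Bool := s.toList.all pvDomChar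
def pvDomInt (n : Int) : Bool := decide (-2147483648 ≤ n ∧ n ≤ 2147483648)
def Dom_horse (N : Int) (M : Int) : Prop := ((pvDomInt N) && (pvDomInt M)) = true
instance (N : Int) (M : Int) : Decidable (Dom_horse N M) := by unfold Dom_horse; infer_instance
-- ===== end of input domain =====

-- B replaces A's push/scatter knight-path DP by a per-cell combinatorial closed form
-- (each cell is the binomial coefficient C(a+b, a) of its move counts, computed by a
-- short multiplicative product); objective: alternative, not faster.

-- ===== PORT A =====
-- board[i][j] (the loop indices are always in range; an out-of-range read yields 0)
def get2 (b : List (List Int)) (i j : Nat) : Int := (b.getD i []).getD j 0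

-- board[i][j] += v
def upd2 (b : List (List Int)) (i j : Nat) (v : Int) : List (List Int) :=
  b.set i ((b.getD i []).set j ((b.getD i []).getD j 0 + v))

-- second guarded update of A's loop body (board[i][j] is re-read after the first update)
def stepA2 (n m : Nat) (b1 : List (List Int)) (i j : Nat) : List (List Int) :=
  if i + 1 < n ∧ j + 2 < m then upd2 b1 (i + 1) (j + 2) (get2 b1 i j) else b1

-- the body of A's inner loop for cell (i, j)
def stepA (n m : Nat) (b : List (List Int)) (i j : Nat) : List (List Int) :=
  if get2 b i j ≠ 0 then
    stepA2 n m (if i + 2 < n ∧ j + 1 < m then upd2 b (i + 2) (j + 1) (get2 b i j) else b) i j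
  else b

-- A's inner loop over j for a fixed row i
def processRow (n m : Nat) (b : List (List Int)) (i : Nat) : List (List Int) :=
  (List.range m).foldl (fun b j => stepA n m b i j) b

-- board = [[0]*M for _ in range(N)]; board[0][0] = 1
def board0 (n m : Nat) : List (List Int) :=
  (List.replicate n (List.replicate m (0 : Int))).set 0 ((List.replicate m (0 : Int)).set 0 1)

def horse (N : Int) (M : Int) : List (List Int) × Int :=
  let n := N.toNat
  let m := M.toNat
  let b := (List.range n).foldl (processRow n m) (board0 n m)
  (b, get2 b (n - 1) (m - 1))

-- ===== PORT B =====
-- paths(i, j): 0 unless a = (2i-j)/3 and b = (2j-i)/3 are nonnegative integers,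
-- else C(a+b, a) computed by the product loop r = r*(b+k)//k for k = 1..a
def pathsB (i j : Nat) : Int :=
  if PySem.Int.mod ((i : Int) + (j : Int)) 3 ≠ 0 then 0
  else
    let a := PySem.Int.floordiv (2 * (i : Int) - (j : Int)) 3
    let b := PySem.Int.floordiv (2 * (j : Int) - (i : Int)) 3
    if a < 0 ∨ b < 0 then 0
    else (PySem.List.pyRange 1 (a + 1) 1).foldl
      (fun r k => PySem.Int.floordiv (r * (b + k)) k) 1

def horse_alt (N : Int) (M : Int) : List (List Int) × Int :=
  let n := N.toNat
  let m := M.toNat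
  let board := (List.range n).map (fun i => (List.range m).map (fun j => pathsB i j))
  (board, get2 board (n - 1) (m - 1))

-- ===== PRECONDITION & SPEC =====
-- Pre_ excludes N ≤ 0 or M ≤ 0: there Python A raises IndexError (seeding the first cell
-- of an empty board, or reading the last cell of an empty row), and Python B raises too.
def Pre_horse (N : Int) (M : Int) : Prop := 1 ≤ N ∧ 1 ≤ M
instance (N : Int) (M : Int) : Decidable (Pre_horse N M) := by unfold Pre_horse; infer_instance
def pvWitness_horse : Int × Int := (3, 4)

def Spec_horse (N : Int) (M : Int) (out : List (List Int) × Int) : Prop := out = horse_alt N M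
instance (N : Int) (M : Int) (out : List (List Int) × Int) : Decidable (Spec_horse N M out) := by unfold Spec_horse; infer_instance

-- ===== CLAIM (what is proved, stated in full; the proofs are below) =====
def Claim_equal_horse : Prop := ∀ (N : Int) (M : Int), Dom_horse N M → Pre_horse N M → Spec_horse N M (horse N M)

-- ===== LEMMAS AND PROOFS =====

-- the common value of cell (i, j): number of restricted knight paths from (0, 0)
def F (i j : Nat) : Int :=
  if i = 0 ∧ j = 0 then 1
  else (if h : 2 ≤ i ∧ 1 ≤ j then F (i - 2) (j - 1) else 0)
     + (if h : 1 ≤ i ∧ 2 ≤ j then F (i - 1) (j - 2) else 0)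
termination_by i
decreasing_by all_goals omega

lemma F_eq (i j : Nat) : F i j =
    if i = 0 ∧ j = 0 then 1
    else (if 2 ≤ i ∧ 1 ≤ j then F (i - 2) (j - 1) else 0)
       + (if 1 ≤ i ∧ 2 ≤ j then F (i - 1) (j - 2) else 0) := by
  rw [F]
  simp only [dite_eq_ite]

def finalBoard (n m : Nat) : List (List Int) :=
  (List.range n).map (fun i => (List.range m).map (fun j => F i j))

def Shape (n m : Nat) (b : List (List Int)) : Prop :=
  b.length = n ∧ ∀ i, i < n → (b.getD i []).length = m

-- the intermediate value of A's cell (i, j) after A has fully processed rows < k and the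
-- first t cells of row k
def H (k t i j : Nat) : Int :=
  if i ≤ k then F i j
  else if i = k + 1 then
    (if 1 ≤ k ∧ 1 ≤ j then F (k - 1) (j - 1) else 0)
      + (if 2 ≤ j ∧ j - 2 < t then F k (j - 2) else 0)
  else if i = k + 2 then (if 1 ≤ j ∧ j - 1 < t then F k (j - 1) else 0)
  else 0

lemma getD_set {α : Type} (b : List α) (i : Nat) (v : α) (i' : Nat) (d : α) :
    (b.set i v).getD i' d = if i = i' ∧ i' < b.length then v else b.getD i' d := by
  induction b generalizing i i' with
  | nil => simp
  | cons a l ih =>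
    cases i with
    | zero => cases i' <;> simp
    | succ k =>
      cases i' with
      | zero => simp
      | succ k' => simpa [Nat.succ_lt_succ_iff] using ih k k'

lemma getD_replicate {α : Type} (n i : Nat) (v d : α) :
    (List.replicate n v).getD i d = if i < n then v else d := by
  induction n generalizing i with
  | zero => simp
  | succ n ih =>
    cases i with
    | zero => simp
    | succ k => simpa [List.replicate_succ, Nat.succ_lt_succ_iff] using ih k

lemma get2_upd2 (b : List (List Int)) (i j : Nat) (v : Int) (i' j' : Nat) :
    get2 (upd2 b i j v) i' j' =
      if i = i' ∧ j = j' ∧ i' < b.length ∧ j' < (b.getD i []).length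
      then get2 b i' j' + v else get2 b i' j' := by
  unfold get2 upd2
  rw [getD_set]
  by_cases hc : i = i' ∧ i' < b.length
  · obtain ⟨rfl, hl⟩ := hc
    rw [if_pos ⟨rfl, hl⟩, getD_set]
    by_cases hc2 : j = j' ∧ j' < (b.getD i []).length
    · obtain ⟨rfl, hr⟩ := hc2
      rw [if_pos ⟨rfl, hr⟩, if_pos ⟨rfl, rfl, hl, hr⟩]
    · rw [if_neg hc2, if_neg (fun h => hc2 ⟨h.2.1, h.2.2.2⟩)]
  · rw [if_neg hc, if_neg (fun h => hc ⟨h.1, h.2.2.1⟩)]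

lemma length_upd2 (b : List (List Int)) (i j : Nat) (v : Int) :
    (upd2 b i j v).length = b.length := by simp [upd2]

lemma rowlen_upd2 (b : List (List Int)) (i j : Nat) (v : Int) (i' : Nat) :
    ((upd2 b i j v).getD i' []).length = (b.getD i' []).length := by
  rw [upd2, getD_set]
  split_ifs with h
  · obtain ⟨rfl, _⟩ := h; simp
  · rfl

lemma shape_upd2 {n m : Nat} {b : List (List Int)} (h : Shape n m b) (i j : Nat) (v : Int) :
    Shape n m (upd2 b i j v) := by
  obtain ⟨h1, h2⟩ := h
  exact ⟨by rw [length_upd2, h1], fun i' hi' => by rw [rowlen_upd2]; exact h2 i' hi'⟩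

lemma shape_stepA {n m : Nat} {b : List (List Int)} (h : Shape n m b) (k t : Nat) :
    Shape n m (stepA n m b k t) := by
  unfold stepA stepA2
  split_ifs <;>
    first
      | exact h
      | exact shape_upd2 h _ _ _
      | exact shape_upd2 (shape_upd2 h _ _ _) _ _ _

-- a guarded in-range update seen through get2, using the shape
lemma get2_upd2' {n m : Nat} {b : List (List Int)} (hs : Shape n m b) {i j : Nat}
    (hi : i < n) (hj : j < m) (v : Int) (i' j' : Nat) :
    get2 (upd2 b i j v) i' j' = if i = i' ∧ j = j' then get2 b i' j' + v else get2 b i' j' := by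
  obtain ⟨h1, h2⟩ := hs
  rw [get2_upd2]
  by_cases hij : i = i' ∧ j = j'
  · obtain ⟨rfl, rfl⟩ := hij
    rw [if_pos ⟨rfl, rfl, by omega, by rw [h2 i hi]; exact hj⟩, if_pos ⟨rfl, rfl⟩]
  · rw [if_neg (fun h => hij ⟨h.1, h.2.1⟩), if_neg hij]

lemma stepA_get2 {n m : Nat} {b : List (List Int)} (hs : Shape n m b) (k t i j : Nat) :
    get2 (stepA n m b k t) i j = get2 b i j
      + (if i = k + 2 ∧ j = t + 1 ∧ k + 2 < n ∧ t + 1 < m then get2 b k t else 0)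
      + (if i = k + 1 ∧ j = t + 2 ∧ k + 1 < n ∧ t + 2 < m then get2 b k t else 0) := by
  unfold stepA
  by_cases hv : get2 b k t = 0
  · rw [if_neg (fun h => h hv), hv]
    simp
  · rw [if_pos hv]
    set b1 := (if k + 2 < n ∧ t + 1 < m then upd2 b (k + 2) (t + 1) (get2 b k t) else b)
      with hb1def
    have hsb1 : Shape n m b1 := by
      rw [hb1def]
      by_cases c1 : k + 2 < n ∧ t + 1 < m
      · rw [if_pos c1]; exact shape_upd2 hs _ _ _
      · rw [if_neg c1]; exact hs
    have hkt : get2 b1 k t = get2 b k t := by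
      rw [hb1def]
      by_cases c1 : k + 2 < n ∧ t + 1 < m
      · rw [if_pos c1, get2_upd2' hs c1.1 c1.2,
            if_neg (show ¬(k + 2 = k ∧ t + 1 = t) by omega)]
      · rw [if_neg c1]
    have hij : get2 b1 i j = get2 b i j
        + (if i = k + 2 ∧ j = t + 1 ∧ k + 2 < n ∧ t + 1 < m then get2 b k t else 0) := by
      rw [hb1def]
      by_cases c1 : k + 2 < n ∧ t + 1 < m
      · rw [if_pos c1, get2_upd2' hs c1.1 c1.2]
        by_cases hA : i = k + 2 ∧ j = t + 1
        · rw [if_pos (show k + 2 = i ∧ t + 1 = j from ⟨hA.1.symm, hA.2.symm⟩),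
              if_pos (show i = k + 2 ∧ j = t + 1 ∧ k + 2 < n ∧ t + 1 < m from
                ⟨hA.1, hA.2, c1.1, c1.2⟩)]
        · rw [if_neg (show ¬(k + 2 = i ∧ t + 1 = j) from fun h => hA ⟨h.1.symm, h.2.symm⟩),
              if_neg (show ¬(i = k + 2 ∧ j = t + 1 ∧ k + 2 < n ∧ t + 1 < m) from
                fun h => hA ⟨h.1, h.2.1⟩)]
          ring
      · rw [if_neg c1,
            if_neg (show ¬(i = k + 2 ∧ j = t + 1 ∧ k + 2 < n ∧ t + 1 < m) from
              fun h => c1 ⟨h.2.2.1, h.2.2.2⟩)]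
        ring
    unfold stepA2
    by_cases c2 : k + 1 < n ∧ t + 2 < m
    · rw [if_pos c2, get2_upd2' hsb1 c2.1 c2.2, hkt]
      by_cases hB : i = k + 1 ∧ j = t + 2
      · rw [if_pos (show k + 1 = i ∧ t + 2 = j from ⟨hB.1.symm, hB.2.symm⟩), hij,
            if_pos (show i = k + 1 ∧ j = t + 2 ∧ k + 1 < n ∧ t + 2 < m from
              ⟨hB.1, hB.2, c2.1, c2.2⟩)]
      · rw [if_neg (show ¬(k + 1 = i ∧ t + 2 = j) from fun h => hB ⟨h.1.symm, h.2.symm⟩), hij,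
            if_neg (show ¬(i = k + 1 ∧ j = t + 2 ∧ k + 1 < n ∧ t + 2 < m) from
              fun h => hB ⟨h.1, h.2.1⟩)]
        ring
    · rw [if_neg c2, hij,
          if_neg (show ¬(i = k + 1 ∧ j = t + 2 ∧ k + 1 < n ∧ t + 2 < m) from
            fun h => c2 ⟨h.2.2.1, h.2.2.2⟩)]
      ring

lemma H_diag (k t : Nat) : H k t k t = F k t := by
  simp [H]

lemma H_step (n m k t i j : Nat) (hi : i < n) (hj : j < m) :
    H k (t + 1) i j = H k t i j
      + (if i = k + 2 ∧ j = t + 1 ∧ k + 2 < n ∧ t + 1 < m then F k t else 0)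
      + (if i = k + 1 ∧ j = t + 2 ∧ k + 1 < n ∧ t + 2 < m then F k t else 0) := by
  unfold H
  by_cases h1 : i ≤ k
  · rw [if_pos h1, if_pos h1,
        if_neg (show ¬(i = k + 2 ∧ j = t + 1 ∧ k + 2 < n ∧ t + 1 < m) by omega),
        if_neg (show ¬(i = k + 1 ∧ j = t + 2 ∧ k + 1 < n ∧ t + 2 < m) by omega)]
    ring
  · rw [if_neg h1, if_neg h1]
    by_cases h2 : i = k + 1
    · rw [if_pos h2, if_pos h2,
          if_neg (show ¬(i = k + 2 ∧ j = t + 1 ∧ k + 2 < n ∧ t + 1 < m) by omega)]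
      by_cases hj2 : j = t + 2
      · subst hj2
        rw [if_pos (show 2 ≤ t + 2 ∧ t + 2 - 2 < t + 1 by omega),
            if_neg (show ¬(2 ≤ t + 2 ∧ t + 2 - 2 < t) by omega),
            if_pos (show i = k + 1 ∧ t + 2 = t + 2 ∧ k + 1 < n ∧ t + 2 < m from
              ⟨h2, rfl, by omega, by omega⟩),
            show t + 2 - 2 = t from by omega]
        ring
      · rw [if_congr (show (2 ≤ j ∧ j - 2 < t + 1) ↔ (2 ≤ j ∧ j - 2 < t) by omega) rfl rfl,
            if_neg (show ¬(i = k + 1 ∧ j = t + 2 ∧ k + 1 < n ∧ t + 2 < m) by omega)]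
        ring
    · rw [if_neg h2, if_neg h2,
          if_neg (show ¬(i = k + 1 ∧ j = t + 2 ∧ k + 1 < n ∧ t + 2 < m) by omega)]
      by_cases h3 : i = k + 2
      · rw [if_pos h3, if_pos h3]
        by_cases hj1 : j = t + 1
        · subst hj1
          rw [if_pos (show 1 ≤ t + 1 ∧ t + 1 - 1 < t + 1 by omega),
              if_neg (show ¬(1 ≤ t + 1 ∧ t + 1 - 1 < t) by omega),
              if_pos (show i = k + 2 ∧ t + 1 = t + 1 ∧ k + 2 < n ∧ t + 1 < m from
                ⟨h3, rfl, by omega, by omega⟩),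
              show t + 1 - 1 = t from by omega]
          ring
        · rw [if_congr (show (1 ≤ j ∧ j - 1 < t + 1) ↔ (1 ≤ j ∧ j - 1 < t) by omega) rfl rfl,
              if_neg (show ¬(i = k + 2 ∧ j = t + 1 ∧ k + 2 < n ∧ t + 1 < m) by omega)]
          ring
      · rw [if_neg h3, if_neg h3,
            if_neg (show ¬(i = k + 2 ∧ j = t + 1 ∧ k + 2 < n ∧ t + 1 < m) by omega)]
        ring

lemma col_inv (n m k : Nat) (hk : k < n) (b : List (List Int)) (hs0 : Shape n m b)
    (hb0 : ∀ i, i < n → ∀ j, j < m → get2 b i j = H k 0 i j) :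
    ∀ t, t ≤ m →
      Shape n m ((List.range t).foldl (fun b j => stepA n m b k j) b) ∧
      ∀ i, i < n → ∀ j, j < m →
        get2 ((List.range t).foldl (fun b j => stepA n m b k j) b) i j = H k t i j := by
  intro t
  induction t with
  | zero => intro _; simpa using ⟨hs0, hb0⟩
  | succ t ih =>
    intro htm
    obtain ⟨sh, hb⟩ := ih (by omega)
    rw [List.range_succ, List.foldl_append, List.foldl_cons, List.foldl_nil]
    refine ⟨shape_stepA sh k t, ?_⟩
    intro i hi j hj
    rw [stepA_get2 sh k t i j, hb i hi j hj, hb k hk t (by omega), H_diag,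
        H_step n m k t i j hi hj]

lemma shape_board0 (n m : Nat) : Shape n m (board0 n m) := by
  constructor
  · simp [board0]
  · intro i hi
    rw [board0, getD_set]
    split_ifs with h
    · simp
    · rw [getD_replicate, if_pos hi]
      simp

lemma get2_board0 (n m i j : Nat) (hi : i < n) (hj : j < m) :
    get2 (board0 n m) i j = if i = 0 ∧ j = 0 then 1 else 0 := by
  unfold get2 board0
  rw [getD_set]
  by_cases h0 : i = 0
  · subst h0
    rw [if_pos ⟨rfl, by simpa using hi⟩, getD_set, getD_replicate]
    by_cases hj0 : j = 0
    · subst hj0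
      rw [if_pos ⟨rfl, by simpa using hj⟩]
      simp
    · rw [if_neg (fun h => hj0 h.1.symm), if_pos hj]
      simp [hj0]
  · rw [if_neg (fun h => h0 h.1.symm), getD_replicate, if_pos hi, getD_replicate, if_pos hj]
    simp [h0]

lemma H_zero (i j : Nat) : H 0 0 i j = if i = 0 ∧ j = 0 then 1 else 0 := by
  unfold H
  by_cases h1 : i ≤ 0
  · have hi0 : i = 0 := by omega
    subst hi0
    rw [if_pos (le_refl 0), F_eq]
    by_cases hj : j = 0
    · subst hj
      rw [if_pos ⟨rfl, rfl⟩, if_pos ⟨rfl, rfl⟩]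
    · rw [if_neg (show ¬(2 ≤ 0 ∧ 1 ≤ j) by omega),
          if_neg (show ¬(1 ≤ 0 ∧ 2 ≤ j) by omega),
          if_neg (show ¬((0 : Nat) = 0 ∧ j = 0) from fun h => hj h.2),
          if_neg (show ¬((0 : Nat) = 0 ∧ j = 0) from fun h => hj h.2)]
      ring
  · rw [if_neg h1, if_neg (show ¬(i = 0 ∧ j = 0) by omega)]
    split_ifs <;> omega

lemma H_row_done (k m i j : Nat) (hj : j < m) : H k m i j = H (k + 1) 0 i j := by
  unfold H
  by_cases h1 : i ≤ k
  · rw [if_pos h1, if_pos (show i ≤ k + 1 by omega)]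
  · rw [if_neg h1]
    by_cases h2 : i = k + 1
    · rw [if_pos h2, if_pos (show i ≤ k + 1 by omega), h2, F_eq (k + 1) j,
          if_neg (show ¬(k + 1 = 0 ∧ j = 0) by omega)]
      congr 1
      · rw [if_congr (show (1 ≤ k ∧ 1 ≤ j) ↔ (2 ≤ k + 1 ∧ 1 ≤ j) by omega) rfl rfl,
            show k + 1 - 2 = k - 1 from by omega]
      · rw [if_congr (show (2 ≤ j ∧ j - 2 < m) ↔ (1 ≤ k + 1 ∧ 2 ≤ j) by omega) rfl rfl,
            show k + 1 - 1 = k from by omega]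
    · rw [if_neg h2, if_neg (show ¬ i ≤ k + 1 by omega)]
      by_cases h3 : i = k + 2
      · rw [if_pos h3, if_pos (show i = k + 1 + 1 by omega),
            if_neg (show ¬(2 ≤ j ∧ j - 2 < 0) by omega),
            if_congr (show (1 ≤ j ∧ j - 1 < m) ↔ (1 ≤ k + 1 ∧ 1 ≤ j) by omega) rfl rfl,
            show k + 1 - 1 = k from by omega]
        ring
      · rw [if_neg h3, if_neg (show ¬ i = k + 1 + 1 by omega)]
        by_cases h4 : i = k + 1 + 2
        · rw [if_pos h4, if_neg (show ¬(1 ≤ j ∧ j - 1 < 0) by omega)]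
        · rw [if_neg h4]

lemma push_inv (n m : Nat) :
    ∀ k, k ≤ n →
      Shape n m ((List.range k).foldl (processRow n m) (board0 n m)) ∧
      ∀ i, i < n → ∀ j, j < m →
        get2 ((List.range k).foldl (processRow n m) (board0 n m)) i j = H k 0 i j := by
  intro k
  induction k with
  | zero =>
    intro _
    refine ⟨by simpa using shape_board0 n m, ?_⟩
    intro i hi j hj
    simpa [H_zero] using get2_board0 n m i j hi hj
  | succ k ih =>
    intro hk
    obtain ⟨sh, hb⟩ := ih (by omega)
    rw [List.range_succ, List.foldl_append, List.foldl_cons, List.foldl_nil]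
    have hcol := col_inv n m k (by omega) _ sh hb m le_rfl
    refine ⟨hcol.1, ?_⟩
    intro i hi j hj
    rw [← H_row_done k m i j hj]
    exact hcol.2 i hi j hj

lemma getD_eq_getElem' {α : Type} (l : List α) (i : Nat) (d : α) (h : i < l.length) :
    l.getD i d = l[i] := by
  rw [List.getD_eq_getElem?_getD, List.getElem?_eq_getElem h]
  rfl

lemma board_ext (n m : Nat) (b : List (List Int)) (hs : Shape n m b)
    (h : ∀ i, i < n → ∀ j, j < m → get2 b i j = F i j) : b = finalBoard n m := by
  obtain ⟨h1, h2⟩ := hs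
  apply List.ext_getElem (by simp [finalBoard, h1])
  intro i hi hi'
  have hin : i < n := by rw [h1] at hi; exact hi
  have hbrow : b[i] = b.getD i [] := (getD_eq_getElem' b i [] hi).symm
  have hfrow : (finalBoard n m)[i] = (List.range m).map (fun j => F i j) := by
    simp [finalBoard]
  rw [hbrow, hfrow]
  apply List.ext_getElem (by rw [h2 i hin]; simp)
  intro j hj hj'
  have hjm : j < m := by rw [h2 i hin] at hj; exact hj
  rw [← getD_eq_getElem' (b.getD i []) j 0 hj]
  have e : ((List.range m).map (fun j => F i j))[j] = F i j := by simp
  rw [e]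
  exact h i hin j hjm

lemma push_final (n m : Nat) :
    (List.range n).foldl (processRow n m) (board0 n m) = finalBoard n m := by
  obtain ⟨sh, hb⟩ := push_inv n m n le_rfl
  refine board_ext n m _ sh ?_
  intro i hi j hj
  rw [hb i hi j hj]
  unfold H
  rw [if_pos (show i ≤ n by omega)]

-- ======== B-side lemmas: the closed form equals F ========

-- the closed form as a Nat-level function
def G (i j : Nat) : Int :=
  if 3 ∣ (i + j) ∧ j ≤ 2 * i ∧ i ≤ 2 * j
  then ((Nat.choose ((i + j) / 3) ((2 * i - j) / 3) : Nat) : Int) else 0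

-- Pascal step in the (a, b)-coordinates
lemma pascal_ab (a b : Nat) : Nat.choose (a + 1 + (b + 1)) (a + 1)
    = Nat.choose (a + (b + 1)) a + Nat.choose (a + 1 + b) (a + 1) := by
  rw [show a + 1 + (b + 1) = (a + 1 + b) + 1 from by omega, Nat.choose_succ_succ']
  congr 2
  omega

lemma G_rec (i j : Nat) (h0 : ¬(i = 0 ∧ j = 0)) :
    G i j = (if 2 ≤ i ∧ 1 ≤ j then G (i - 2) (j - 1) else 0)
          + (if 1 ≤ i ∧ 2 ≤ j then G (i - 1) (j - 2) else 0) := by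
  by_cases hc : 3 ∣ (i + j) ∧ j ≤ 2 * i ∧ i ≤ 2 * j
  · obtain ⟨hd, hji, hij⟩ := hc
    obtain ⟨s, hs⟩ := hd
    have hs1 : 1 ≤ s := by omega
    have ea : (2 * i - j) / 3 = 2 * s - j := by omega
    have es : (i + j) / 3 = s := by omega
    rw [G, if_pos ⟨⟨s, hs⟩, hji, hij⟩, ea, es]
    by_cases hA : j + 3 ≤ 2 * i
    · by_cases hB : i + 3 ≤ 2 * j
      · -- both predecessors contribute
        rw [if_pos (show 2 ≤ i ∧ 1 ≤ j by omega), if_pos (show 1 ≤ i ∧ 2 ≤ j by omega),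
            G, if_pos (show 3 ∣ (i - 2 + (j - 1)) ∧ j - 1 ≤ 2 * (i - 2) ∧ i - 2 ≤ 2 * (j - 1)
              by omega),
            G, if_pos (show 3 ∣ (i - 1 + (j - 2)) ∧ j - 2 ≤ 2 * (i - 1) ∧ i - 1 ≤ 2 * (j - 2)
              by omega)]
        obtain ⟨a, ha⟩ : ∃ a, 2 * s - j = a + 1 := ⟨2 * s - j - 1, by omega⟩
        obtain ⟨b, hb⟩ : ∃ b, s = a + 1 + (b + 1) := ⟨s - (2 * s - j) - 1, by omega⟩
        rw [show (i - 2 + (j - 1)) / 3 = a + (b + 1) from by omega,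
            show (2 * (i - 2) - (j - 1)) / 3 = a from by omega,
            show (i - 1 + (j - 2)) / 3 = a + 1 + b from by omega,
            show (2 * (i - 1) - (j - 2)) / 3 = a + 1 from by omega,
            ha, hb]
        exact_mod_cast pascal_ab a b
      · -- b = 0: only the (i-2, j-1) predecessor contributes
        have heq : 2 * s - j = s := by omega
        rw [heq]
        have t2 : (if 1 ≤ i ∧ 2 ≤ j then G (i - 1) (j - 2) else 0) = 0 := by
          split_ifs with h
          · rw [G, if_neg (show ¬(3 ∣ (i - 1 + (j - 2)) ∧ j - 2 ≤ 2 * (i - 1) ∧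
                i - 1 ≤ 2 * (j - 2)) by omega)]
          · rfl
        rw [t2, if_pos (show 2 ≤ i ∧ 1 ≤ j by omega),
            G, if_pos (show 3 ∣ (i - 2 + (j - 1)) ∧ j - 1 ≤ 2 * (i - 2) ∧ i - 2 ≤ 2 * (j - 1)
              by omega),
            show (i - 2 + (j - 1)) / 3 = s - 1 from by omega,
            show (2 * (i - 2) - (j - 1)) / 3 = s - 1 from by omega,
            Nat.choose_self, Nat.choose_self]
        simp
    · -- a = 0: only the (i-1, j-2) predecessor contributes
      have heq : 2 * s - j = 0 := by omega
      rw [heq]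
      have t1 : (if 2 ≤ i ∧ 1 ≤ j then G (i - 2) (j - 1) else 0) = 0 := by
        split_ifs with h
        · rw [G, if_neg (show ¬(3 ∣ (i - 2 + (j - 1)) ∧ j - 1 ≤ 2 * (i - 2) ∧
              i - 2 ≤ 2 * (j - 1)) by omega)]
        · rfl
      rw [t1, if_pos (show 1 ≤ i ∧ 2 ≤ j by omega),
          G, if_pos (show 3 ∣ (i - 1 + (j - 2)) ∧ j - 2 ≤ 2 * (i - 1) ∧ i - 1 ≤ 2 * (j - 2)
            by omega),
          show (i - 1 + (j - 2)) / 3 = s - 1 from by omega,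
          show (2 * (i - 1) - (j - 2)) / 3 = 0 from by omega,
          Nat.choose_zero_right, Nat.choose_zero_right]
      simp
  · rw [G, if_neg hc]
    have t1 : (if 2 ≤ i ∧ 1 ≤ j then G (i - 2) (j - 1) else 0) = 0 := by
      split_ifs with h
      · rw [G, if_neg (show ¬(3 ∣ (i - 2 + (j - 1)) ∧ j - 1 ≤ 2 * (i - 2) ∧
            i - 2 ≤ 2 * (j - 1)) by omega)]
      · rfl
    have t2 : (if 1 ≤ i ∧ 2 ≤ j then G (i - 1) (j - 2) else 0) = 0 := by
      split_ifs with h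
      · rw [G, if_neg (show ¬(3 ∣ (i - 1 + (j - 2)) ∧ j - 2 ≤ 2 * (i - 1) ∧
            i - 1 ≤ 2 * (j - 2)) by omega)]
      · rfl
    rw [t1, t2]
    ring

lemma F_eq_G : ∀ i j, F i j = G i j := by
  intro i
  induction i using Nat.strong_induction_on with
  | _ i ih =>
    intro j
    rw [F_eq]
    by_cases h0 : i = 0 ∧ j = 0
    · obtain ⟨rfl, rfl⟩ := h0
      rw [if_pos ⟨rfl, rfl⟩, G]
      norm_num
    · rw [if_neg h0, G_rec i j h0]
      congr 1
      · split_ifs with h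
        · exact ih (i - 2) (by omega) (j - 1)
        · rfl
      · split_ifs with h
        · exact ih (i - 1) (by omega) (j - 2)
        · rfl

-- the multiplicative product loop computes the binomial coefficient
lemma loop_choose (b : Nat) : ∀ a : Nat,
    (PySem.List.pyRange 1 ((a : Int) + 1) 1).foldl
      (fun r k => PySem.Int.floordiv (r * ((b : Int) + k)) k) 1
    = ((Nat.choose (a + b) a : Nat) : Int) := by
  intro a
  induction a with
  | zero =>
    rw [Nat.cast_zero, zero_add, PySem.List.pyRange_one_eq_nil le_rfl]
    simp
  | succ a ih =>
    rw [show ((a + 1 : Nat) : Int) + 1 = ((a : Int) + 1) + 1 from by push_cast; ring,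
        PySem.List.pyRange_one_succ_right (by omega), List.foldl_append, ih,
        List.foldl_cons, List.foldl_nil]
    have h1 : ((Nat.choose (a + b) a : Nat) : Int) * ((b : Int) + ((a : Int) + 1))
        = ((Nat.choose (a + b + 1) (a + 1) * (a + 1) : Nat) : Int) := by
      have := Nat.add_one_mul_choose_eq (a + b) a
      push_cast
      push_cast at this
      linarith [this]
    rw [h1, show ((a : Int) + 1) = ((a + 1 : Nat) : Int) from by push_cast; ring,
        PySem.Int.floordiv_natCast, Nat.mul_div_cancel _ (by omega),
        show a + b + 1 = a + 1 + b from by omega]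

lemma pathsB_eq_F (i j : Nat) : pathsB i j = F i j := by
  rw [F_eq_G, pathsB, G]
  have hm : PySem.Int.mod ((i : Int) + (j : Int)) 3
      = (((i + j) % 3 : Nat) : Int) := by
    rw [show ((i : Int) + (j : Int)) = ((i + j : Nat) : Int) from by push_cast; ring]
    exact_mod_cast PySem.Int.mod_natCast (i + j) 3
  by_cases hd : 3 ∣ (i + j)
  · rw [hm, if_neg (show ¬(((i + j) % 3 : Nat) : Int) ≠ 0 from by push_cast; omega)]
    by_cases hab : j ≤ 2 * i ∧ i ≤ 2 * j
    · obtain ⟨hji, hij⟩ := hab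
      have ea : PySem.Int.floordiv (2 * (i : Int) - (j : Int)) 3
          = (((2 * i - j) / 3 : Nat) : Int) := by
        rw [show (2 * (i : Int) - (j : Int)) = ((2 * i - j : Nat) : Int) from by
              push_cast [hji]; ring]
        exact_mod_cast PySem.Int.floordiv_natCast (2 * i - j) 3
      have eb : PySem.Int.floordiv (2 * (j : Int) - (i : Int)) 3
          = (((2 * j - i) / 3 : Nat) : Int) := by
        rw [show (2 * (j : Int) - (i : Int)) = ((2 * j - i : Nat) : Int) from by
              push_cast [hij]; ring]
        exact_mod_cast PySem.Int.floordiv_natCast (2 * j - i) 3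
      simp only [ea, eb]
      rw [if_neg (show ¬((((2 * i - j) / 3 : Nat) : Int) < 0 ∨
            (((2 * j - i) / 3 : Nat) : Int) < 0) from by push_cast; omega),
          if_pos (show 3 ∣ (i + j) ∧ j ≤ 2 * i ∧ i ≤ 2 * j from ⟨hd, hji, hij⟩),
          loop_choose]
      congr 2
      omega
    · have hneg : PySem.Int.floordiv (2 * (i : Int) - (j : Int)) 3 < 0 ∨
             PySem.Int.floordiv (2 * (j : Int) - (i : Int)) 3 < 0 := by
        rcases (show 2 * i < j ∨ 2 * j < i by omega) with h | h
        · left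
          rw [PySem.Int.floordiv_lt_iff_lt_mul (by norm_num)]
          push_cast
          omega
        · right
          rw [PySem.Int.floordiv_lt_iff_lt_mul (by norm_num)]
          push_cast
          omega
      rw [if_pos hneg,
          if_neg (show ¬(3 ∣ (i + j) ∧ j ≤ 2 * i ∧ i ≤ 2 * j) from
            fun h => hab ⟨h.2.1, h.2.2⟩)]
  · rw [hm, if_pos (show (((i + j) % 3 : Nat) : Int) ≠ 0 from by push_cast; omega),
        if_neg (show ¬(3 ∣ (i + j) ∧ j ≤ 2 * i ∧ i ≤ 2 * j) from fun h => hd h.1)]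

lemma alt_board (n m : Nat) :
    (List.range n).map (fun i => (List.range m).map (fun j => pathsB i j))
      = finalBoard n m := by
  unfold finalBoard
  simp only [pathsB_eq_F]

-- ===== VERDICT (by name: the statement is the Claim_ definition above) =====
theorem horse_spec : Claim_equal_horse := by
  intro N M _ _
  show horse N M = horse_alt N M
  simp only [horse, horse_alt]
  rw [push_final, alt_board]
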